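-- pv_equiv track=rewrite | github.com/prabhakaran-jm/co2-shopping-assistant | src/agents/comparison_agent.py | _extract_comparison_type
-- ===== SOURCE A (Python) =====
-- def _extract_comparison_type(message: str) -> str:
--     """Extract comparison type from user message"""
--     message_lower = message.lower()
--
--     if any(word in message_lower for word in ["eco-value", "eco value", "eco-value"]):
--         return "eco_value"
--     elif any(word in message_lower for word in ["co2 efficiency", "co2-efficiency", "carbon efficiency"]):
--         return "co2_efficiency"
--     elif any(word in message_lower for word in ["price optimization", "price-optimization", "best value", "value"]):
--         return "price_optimization"
--     elif any(word in message_lower for word in ["comprehensive", "overall", "complete", "full analysis"]):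
--         return "comprehensive"
--     else:
--         return "eco_value"  # Default to eco-value
-- ===== SOURCE B (Python) =====
-- KEYWORDS = [
--     ("eco-value", "eco_value"), ("eco value", "eco_value"),
--     ("co2 efficiency", "co2_efficiency"), ("co2-efficiency", "co2_efficiency"),
--     ("carbon efficiency", "co2_efficiency"),
--     ("price optimization", "price_optimization"), ("price-optimization", "price_optimization"),
--     ("best value", "price_optimization"), ("value", "price_optimization"),
--     ("comprehensive", "comprehensive"), ("overall", "comprehensive"),
--     ("complete", "comprehensive"), ("full analysis", "comprehensive"),
-- ]
--
-- PRIORITY = ["eco_value", "co2_efficiency", "price_optimization", "comprehensive"]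
--
-- def _extract_comparison_type(message: str) -> str:
--     """Single left-to-right scan over the lowered message: at each position
--     record every keyword starting there, then pick the highest-priority
--     matched label."""
--     m = message.lower()
--     found = set()
--     for i in range(len(m) + 1):
--         for kw, label in KEYWORDS:
--             if m.startswith(kw, i):
--                 found.add(label)
--     for label in PRIORITY:
--         if label in found:
--             return label
--     return "eco_value"
-- ===== Notes on version B (the rewrite author's own statement) =====
-- stated objective: alternative
-- what changed: Instead of A's per-rule substring searches with early exit, B makes one left-to-right scan over the lowered message's suffixes, accumulating the set of labels whose keywords start at each position, then returns the first matched label in priority order.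
import Mathlib
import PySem

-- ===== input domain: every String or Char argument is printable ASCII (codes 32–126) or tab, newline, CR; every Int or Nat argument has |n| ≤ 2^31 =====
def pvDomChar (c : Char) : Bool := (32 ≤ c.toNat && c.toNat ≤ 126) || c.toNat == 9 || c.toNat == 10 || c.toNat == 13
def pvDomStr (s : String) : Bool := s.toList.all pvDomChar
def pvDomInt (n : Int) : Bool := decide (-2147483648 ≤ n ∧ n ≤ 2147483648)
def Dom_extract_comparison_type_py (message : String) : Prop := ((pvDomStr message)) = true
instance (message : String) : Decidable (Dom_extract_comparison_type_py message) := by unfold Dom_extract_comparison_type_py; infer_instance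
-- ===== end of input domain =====

-- B replaces A's per-rule substring tests by one suffix scan collecting the set of matched labels, then a priority pick (alternative, same cost).

-- ===== PORT A =====
def extract_comparison_type_py (message : String) : String :=
  let message_lower := PySem.Str.lower message
  if (["eco-value", "eco value", "eco-value"]).any (fun word => PySem.Str.isIn word message_lower) then
    "eco_value"
  else if (["co2 efficiency", "co2-efficiency", "carbon efficiency"]).any (fun word => PySem.Str.isIn word message_lower) then
    "co2_efficiency"
  else if (["price optimization", "price-optimization", "best value", "value"]).any (fun word => PySem.Str.isIn word message_lower) then
    "price_optimization"
  else if (["comprehensive", "overall", "complete", "full analysis"]).any (fun word => PySem.Str.isIn word message_lower) then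
    "comprehensive"
  else
    "eco_value"

-- ===== PORT B =====
def pvKeywords : List (String × String) :=
  [("eco-value", "eco_value"), ("eco value", "eco_value"),
   ("co2 efficiency", "co2_efficiency"), ("co2-efficiency", "co2_efficiency"),
   ("carbon efficiency", "co2_efficiency"),
   ("price optimization", "price_optimization"), ("price-optimization", "price_optimization"),
   ("best value", "price_optimization"), ("value", "price_optimization"),
   ("comprehensive", "comprehensive"), ("overall", "comprehensive"),
   ("complete", "comprehensive"), ("full analysis", "comprehensive")]

def pvPriority : List String :=
  ["eco_value", "co2_efficiency", "price_optimization", "comprehensive"]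

-- the position loop of Source B: m.startswith(kw, i) checks kw against the suffix m[i:], so the loop over i is recursion over suffixes
def pvScan (tail : List Char) (found : PySem.Set String) : PySem.Set String :=
  let found' := pvKeywords.foldl
    (fun a kw => if PySem.Chars.startswith tail kw.1.toList then PySem.Set.add a kw.2 else a) found
  match tail with
  | [] => found'
  | _ :: t => pvScan t found'

def extract_comparison_type_py_alt (message : String) : String :=
  let found := pvScan (PySem.Chars.lower message.toList) PySem.Set.empty
  ((pvPriority.find? (fun l => PySem.Set.contains found l)).getD "eco_value")

-- ===== PRECONDITION & SPEC =====
def Spec_extract_comparison_type_py (message : String) (out : String) : Prop := out = extract_comparison_type_py_alt message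
instance (message : String) (out : String) : Decidable (Spec_extract_comparison_type_py message out) := by unfold Spec_extract_comparison_type_py; infer_instance

-- ===== CLAIM (what is proved, stated in full; the proofs are below) =====
def Claim_equal_extract_comparison_type_py : Prop := ∀ (message : String), Dom_extract_comparison_type_py message → Spec_extract_comparison_type_py message (extract_comparison_type_py message)

-- ===== LEMMAS AND PROOFS =====

-- membership in the keyword-recording fold over one suffix
theorem mem_foldl_add (P : String × String → Bool) (KW : List (String × String))
    (acc : PySem.Set String) (l : String) :
    l ∈ KW.foldl (fun a kw => if P kw then PySem.Set.add a kw.2 else a) acc ↔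
      l ∈ acc ∨ ∃ kw ∈ KW, P kw = true ∧ kw.2 = l := by
  induction KW generalizing acc with
  | nil => simp
  | cons k t ih =>
    simp only [List.foldl_cons, ih]
    by_cases h : P k = true
    · simp [h, PySem.Set.mem_add]; tauto
    · simp [h]

-- a label is collected by the scan iff one of its keywords occurs in the scanned string
theorem mem_pvScan (tail : List Char) (acc : PySem.Set String) (l : String) :
    l ∈ pvScan tail acc ↔
      l ∈ acc ∨ ∃ kw ∈ pvKeywords, kw.2 = l ∧ PySem.Chars.isIn kw.1.toList tail = true := by
  induction tail generalizing acc with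
  | nil =>
    rw [pvScan]
    simp only [mem_foldl_add]
    simp only [PySem.Chars.startswith_iff, PySem.Chars.isIn_iff_infix]
    simp only [List.prefix_nil, List.infix_nil]
    tauto
  | cons c t ih =>
    rw [pvScan]
    simp only [ih, mem_foldl_add]
    simp only [PySem.Chars.startswith_iff, PySem.Chars.isIn_iff_infix, List.infix_cons_iff]
    constructor
    · rintro ((h | ⟨kw, hm, hp, hl⟩) | ⟨kw, hm, hl, hi⟩)
      · exact Or.inl h
      · exact Or.inr ⟨kw, hm, hl, Or.inl hp⟩
      · exact Or.inr ⟨kw, hm, hl, Or.inr hi⟩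
    · rintro (h | ⟨kw, hm, hl, hp | hi⟩)
      · exact Or.inl (Or.inl h)
      · exact Or.inl (Or.inr ⟨kw, hm, hp, hl⟩)
      · exact Or.inr ⟨kw, hm, hl, hi⟩

theorem contains_pvScan (tail : List Char) (l : String) :
    PySem.Set.contains (pvScan tail PySem.Set.empty) l = true ↔
      ∃ kw ∈ pvKeywords, kw.2 = l ∧ PySem.Chars.isIn kw.1.toList tail = true := by
  rw [PySem.Set.contains_iff, mem_pvScan]
  simp [PySem.Set.empty]

-- ===== VERDICT (by name: the statement is the Claim_ definition above) =====
set_option maxHeartbeats 1000000 in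
theorem extract_comparison_type_py_spec : Claim_equal_extract_comparison_type_py := by
  intro message _
  unfold Spec_extract_comparison_type_py extract_comparison_type_py extract_comparison_type_py_alt pvPriority
  have hE := contains_pvScan (PySem.Chars.lower message.toList) "eco_value"
  have hC := contains_pvScan (PySem.Chars.lower message.toList) "co2_efficiency"
  have hP := contains_pvScan (PySem.Chars.lower message.toList) "price_optimization"
  have hO := contains_pvScan (PySem.Chars.lower message.toList) "comprehensive"
  simp only [pvKeywords] at hE hC hP hO
  simp at hE hC hP hO
  simp only [List.any]
  split_ifs with h1 h2 h3 h4
  · rw [List.find?_cons_of_pos (by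
      simp_all
      rcases h1 with h | h | h
      exacts [Or.inl h, Or.inr h, Or.inl h])]
    rfl
  · rw [List.find?_cons_of_neg (by simp_all), List.find?_cons_of_pos (by simp_all)]; rfl
  · rw [List.find?_cons_of_neg (by simp_all), List.find?_cons_of_neg (by simp_all),
      List.find?_cons_of_pos (by simp_all)]; rfl
  · rw [List.find?_cons_of_neg (by simp_all), List.find?_cons_of_neg (by simp_all),
      List.find?_cons_of_neg (by simp_all), List.find?_cons_of_pos (by simp_all)]; rfl
  · rw [List.find?_cons_of_neg (by simp_all), List.find?_cons_of_neg (by simp_all),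
      List.find?_cons_of_neg (by simp_all), List.find?_cons_of_neg (by simp_all)]; rfl
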